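-- pv_equiv track=rewrite | github.com/iammihirraj/gfg_daily_updates | POTD/AUGUST/22. Make Matrix Beautiful.py | findMinOpeartion
-- ===== SOURCE A (Python) =====
-- def findMinOpeartion(matrix, n):
--     # Code here
--     ma = 0
--     total = 0
--     for i in range(n):
--         a = 0
--         b = 0
--         for j in range(n):
--             a += matrix[i][j]
--             b += matrix[j][i]
--         ma = max(ma,a,b)
--         total += a
--     ma = ma*n
--     return ma-total
-- ===== SOURCE B (Python) =====
-- def findMinOpeartion(matrix, n):
--     # One row-major pass: each element is read once, column sums are maintained
--     # incrementally in an accumulator vector instead of re-scanning matrix[j][i].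
--     cols = [0] * n
--     best = 0
--     total = 0
--     for i in range(n):
--         row = matrix[i]
--         s = 0
--         for j in range(n):
--             v = row[j]
--             s += v
--             cols[j] += v
--         if s > best:
--             best = s
--         total += s
--     for c in cols:
--         if c > best:
--             best = c
--     return best * n - total
-- ===== Notes on version B (the rewrite author's own statement) =====
-- stated objective: alternative
-- what changed: B makes a single row-major pass reading each element once while maintaining a running column-sum accumulator vector, instead of A's interleaved double-read loop that re-scans matrix[j][i] for every i.
import Mathlib
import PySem

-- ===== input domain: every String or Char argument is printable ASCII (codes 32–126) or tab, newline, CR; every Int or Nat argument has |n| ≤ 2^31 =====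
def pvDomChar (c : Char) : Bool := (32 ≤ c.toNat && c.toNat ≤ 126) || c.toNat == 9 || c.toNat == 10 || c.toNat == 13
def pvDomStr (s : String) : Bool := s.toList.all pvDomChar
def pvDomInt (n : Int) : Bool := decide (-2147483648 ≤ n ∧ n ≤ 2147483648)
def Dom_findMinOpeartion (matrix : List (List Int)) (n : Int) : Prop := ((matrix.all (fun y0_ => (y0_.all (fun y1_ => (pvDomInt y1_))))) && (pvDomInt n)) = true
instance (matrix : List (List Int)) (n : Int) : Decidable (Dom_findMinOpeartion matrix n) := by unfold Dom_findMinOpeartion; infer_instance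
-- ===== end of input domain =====

-- B makes one row-major pass reading each element once, maintaining a running column-sum accumulator
-- vector, instead of A's interleaved loop that re-reads matrix[j][i] for every i; objective: alternative.

-- ===== PORT A =====
-- pyGetD is exact here because Pre_ puts every index in range (Python would raise otherwise).
def findMinOpeartion (matrix : List (List Int)) (n : Int) : Int :=
  let r := PySem.List.pyRange 0 n 1
  let st := r.foldl (fun (p : Int × Int) i =>
      let ab := r.foldl (fun (q : Int × Int) j =>
          (q.1 + PySem.List.pyGetD (PySem.List.pyGetD matrix i []) j 0,
           q.2 + PySem.List.pyGetD (PySem.List.pyGetD matrix j []) i 0)) ((0 : Int), (0 : Int))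
      (max (max p.1 ab.1) ab.2, p.2 + ab.1)) ((0 : Int), (0 : Int))
  st.1 * n - st.2

-- ===== PORT B =====
-- State (cols, best, total); [0]*n is List.replicate n.toNat 0 (empty for n ≤ 0, exactly Python);
-- cols[j] += v is a read (pyGetD, always in range here) followed by List.set.
def findMinOpeartion_alt (matrix : List (List Int)) (n : Int) : Int :=
  let r := PySem.List.pyRange 0 n 1
  let st := r.foldl (fun (st : List Int × Int × Int) i =>
      let row := PySem.List.pyGetD matrix i []
      let inner := r.foldl (fun (q : List Int × Int) j =>
          let v := PySem.List.pyGetD row j 0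
          (q.1.set j.toNat (PySem.List.pyGetD q.1 j 0 + v), q.2 + v)) (st.1, (0 : Int))
      (inner.1, max st.2.1 inner.2, st.2.2 + inner.2))
    (List.replicate n.toNat 0, (0 : Int), (0 : Int))
  let best := st.1.foldl (fun b c => max b c) st.2.1
  best * n - st.2.2

-- ===== PRECONDITION & SPEC =====
-- Pre_ excludes exactly the inputs where the Python A raises IndexError: fewer than n rows, or one
-- of the first n rows shorter than n (for n ≤ 0 both loops are empty and both return 0).
def Pre_findMinOpeartion (matrix : List (List Int)) (n : Int) : Prop :=
  n.toNat ≤ matrix.length ∧ ∀ r ∈ matrix.take n.toNat, n.toNat ≤ r.length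
instance (matrix : List (List Int)) (n : Int) : Decidable (Pre_findMinOpeartion matrix n) := by
  unfold Pre_findMinOpeartion; infer_instance
def pvWitness_findMinOpeartion : List (List Int) × Int := ([[1, 2], [3, 4]], 2)

def Spec_findMinOpeartion (matrix : List (List Int)) (n : Int) (out : Int) : Prop := out = findMinOpeartion_alt matrix n
instance (matrix : List (List Int)) (n : Int) (out : Int) : Decidable (Spec_findMinOpeartion matrix n out) := by unfold Spec_findMinOpeartion; infer_instance

-- ===== CLAIM (what is proved, stated in full; the proofs are below) =====
def Claim_equal_findMinOpeartion : Prop := ∀ (matrix : List (List Int)) (n : Int), Dom_findMinOpeartion matrix n → Pre_findMinOpeartion matrix n → Spec_findMinOpeartion matrix n (findMinOpeartion matrix n)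

-- ===== LEMMAS AND PROOFS =====

-- A-side closed forms ------------------------------------------------------

theorem pv_foldl_max_pull (xs : List Int) : ∀ a b : Int,
    xs.foldl max (max a b) = max a (xs.foldl max b) := by
  induction xs with
  | nil => intro a b; simp
  | cons x t ih =>
    intro a b
    simp only [List.foldl_cons]
    rw [max_assoc, ih]

theorem pv_foldl_combo {α : Type} (f g : α → Int) (l : List α) : ∀ c : Int,
    l.foldl (fun m i => max (max m (f i)) (g i)) c
      = (l.map f ++ l.map g).foldl max c := by
  induction l with
  | nil => intro c; simp
  | cons i t ih =>
    intro c
    simp only [List.foldl_cons, List.map_cons, List.cons_append, List.foldl_append]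
    rw [ih]
    simp only [List.foldl_append]
    congr 1
    rw [max_comm (max c (f i)) (g i), pv_foldl_max_pull, max_comm]

theorem pv_foldl_pair_sum {α : Type} (u v : α → Int) (l : List α) : ∀ a b : Int,
    l.foldl (fun (q : Int × Int) j => (q.1 + u j, q.2 + v j)) (a, b)
      = (a + (l.map u).sum, b + (l.map v).sum) := by
  induction l with
  | nil => intro a b; simp
  | cons j t ih => intro a b; simp only [List.foldl_cons, List.map_cons, List.sum_cons, ih]; ring_nf

theorem pv_foldl_outer {α : Type} (f g : α → Int) (l : List α) : ∀ c t : Int,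
    l.foldl (fun (p : Int × Int) i => (max (max p.1 (f i)) (g i), p.2 + f i)) (c, t)
      = (l.foldl (fun m i => max (max m (f i)) (g i)) c, t + (l.map f).sum) := by
  induction l with
  | nil => intro c t; simp
  | cons i t' ih => intro c t; simp only [List.foldl_cons, List.map_cons, List.sum_cons, ih]; ring_nf

-- B-side: the inner fold updates cols at indices 0..M-1 ---------------------

def pvUpd (w : Nat → Int) (cols : List Int) : Nat → List Int
  | 0 => cols
  | M + 1 => (pvUpd w cols M).set M ((pvUpd w cols M).getD M 0 + w M)

theorem pvUpd_length (w : Nat → Int) (cols : List Int) (M : Nat) :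
    (pvUpd w cols M).length = cols.length := by
  induction M with
  | zero => rfl
  | succ M ih => simp [pvUpd, List.length_set, ih]

theorem pvUpd_getElem? (w : Nat → Int) (cols : List Int) (M : Nat) (k : Nat) (hk : k < cols.length) :
    (pvUpd w cols M)[k]? = some (if k < M then cols.getD k 0 + w k else cols.getD k 0) := by
  induction M with
  | zero =>
    simp [pvUpd, List.getD_eq_getElem?_getD, List.getElem?_eq_getElem hk]
  | succ M ih =>
    by_cases h : k = M
    · subst h
      have hl : k < (pvUpd w cols k).length := by rw [pvUpd_length]; exact hk
      simp only [pvUpd, List.getElem?_set_self hl]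
      have h2 : (pvUpd w cols k).getD k 0 = cols.getD k 0 := by
        rw [List.getD_eq_getElem?_getD, ih]; simp
      rw [h2]
      simp
    · simp only [pvUpd, List.getElem?_set_ne (fun he => h he.symm), ih]
      exact congrArg some (if_congr (by omega) rfl rfl)

theorem pvUpd_full (w : Nat → Int) (cols : List Int) (N : Nat) (hN : cols.length = N) :
    pvUpd w cols N = (List.range N).map (fun k => cols.getD k 0 + w k) := by
  apply List.ext_getElem
  · simp [pvUpd_length, hN]
  · intro k h1 h2
    rw [pvUpd_length, hN] at h1
    have := pvUpd_getElem? w cols N k (by omega)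
    rw [List.getElem?_eq_getElem (by rw [pvUpd_length]; omega)] at this
    simp only [Option.some.injEq] at this
    simp [this, h1]

theorem pv_inner_fold (w : Nat → Int) (M : Nat) : ∀ (cols : List Int) (t : Int),
    (List.range M).foldl (fun (q : List Int × Int) k =>
        (q.1.set k (q.1.getD k 0 + w k), q.2 + w k)) (cols, t)
      = (pvUpd w cols M, t + ((List.range M).map w).sum) := by
  induction M with
  | zero => intro cols t; simp [pvUpd]
  | succ M ih =>
    intro cols t
    rw [List.range_succ, List.foldl_append, ih]
    simp [pvUpd, add_assoc]

-- B-side outer invariant ----------------------------------------------------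

theorem pv_outer (e : Nat → Nat → Int) (N : Nat) (M : Nat) :
    (List.range M).foldl (fun (st : List Int × Int × Int) i =>
        let inner := (List.range N).foldl (fun (q : List Int × Int) j =>
            (q.1.set j (q.1.getD j 0 + e i j), q.2 + e i j)) (st.1, (0 : Int))
        (inner.1, max st.2.1 inner.2, st.2.2 + inner.2))
      (List.replicate N 0, (0 : Int), (0 : Int))
    = ((List.range N).map (fun k => ((List.range M).map (fun i => e i k)).sum),
       ((List.range M).map (fun i => ((List.range N).map (fun j => e i j)).sum)).foldl max 0,
       ((List.range M).map (fun i => ((List.range N).map (fun j => e i j)).sum)).sum) := by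
  induction M with
  | zero =>
    simp
  | succ M ih =>
    rw [List.range_succ, List.foldl_append, ih]
    simp only [List.foldl_cons, List.foldl_nil]
    rw [pv_inner_fold]
    have hlen : ((List.range N).map (fun k => ((List.range M).map (fun i => e i k)).sum)).length = N := by
      simp
    rw [pvUpd_full _ _ N hlen]
    simp only [List.map_append, List.map_cons, List.map_nil,
      List.sum_append, List.sum_cons, List.sum_nil, List.foldl_append, List.foldl_cons,
      List.foldl_nil, zero_add, add_zero]
    refine Prod.ext ?_ rfl
    apply List.map_congr_left
    intro k hk
    rw [List.mem_range] at hk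
    rw [PySem.List.getD_map_range _ _ _ _ hk]

-- main equality -------------------------------------------------------------

theorem pv_main (matrix : List (List Int)) (n : Int) :
    findMinOpeartion matrix n = findMinOpeartion_alt matrix n := by
  set N := n.toNat with hN
  set e : Nat → Nat → Int := fun i j => (matrix.getD i []).getD j 0 with he
  have hr : PySem.List.pyRange 0 n 1 = (List.range N).map (fun k : Nat => (k : Int)) := by
    rw [PySem.List.pyRange_one]; simp [hN]
  set rS : Nat → Int := fun i => ((List.range N).map (fun j => e i j)).sum with hrS
  set cS : Nat → Int := fun k => ((List.range N).map (fun i => e i k)).sum with hcS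
  -- A reduces to a single max-fold over row sums and column sums
  have hA : findMinOpeartion matrix n =
      (((List.range N).map rS ++ (List.range N).map cS).foldl max 0) * n
        - ((List.range N).map rS).sum := by
    simp only [findMinOpeartion, hr, List.foldl_map,
      PySem.List.pyGetD_natCast, pv_foldl_pair_sum, zero_add, pv_foldl_outer, pv_foldl_combo]
    rfl
  -- B reduces to the same closed form via the outer invariant
  have hB : findMinOpeartion_alt matrix n =
      (((List.range N).map cS).foldl max (((List.range N).map rS).foldl max 0)) * n
        - ((List.range N).map rS).sum := by
    simp only [findMinOpeartion_alt, hr, List.foldl_map, PySem.List.pyGetD_natCast,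
      Int.toNat_natCast]
    rw [pv_outer e N N]
    simp only [List.foldl_map]
    rfl
  rw [hA, hB, List.foldl_append]

-- ===== VERDICT (by name: the statement is the Claim_ definition above) =====
theorem findMinOpeartion_spec : Claim_equal_findMinOpeartion := by
  intro matrix n _hDom _hPre
  unfold Spec_findMinOpeartion
  exact pv_main matrix n
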